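-- pv_equiv track=rewrite | github.com/ozolzg/CSC108-Winter-2022 | Assignment/Assignment 3/bard.py | unheard_songs
-- ===== SOURCE A (Python) =====
-- villagers_type = dict[str, set[str]]
--
-- bards_type = set[str]
--
-- songs_type = dict[str, set[str]]
--
-- parties_type = list[set[str]]
--
-- def unheard_songs(
--         villagers: villagers_type,
--         bards: bards_type,
--         songs: songs_type,
--         parties: parties_type,
-- ) -> set[str]:
--     """
--     Return a set of songs that have never been heard by non-bards.
--     (This means that only the bards know it.)
--     """
--     villagers_knows_songs = set()
--     for villager_knows_songs in villagers.values():
--         villagers_knows_songs |= villager_knows_songs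
--
--     all_songs = set()
--     for song in songs.keys():
--         all_songs.add(song)
--
--     only_bards = all_songs - villagers_knows_songs
--     return only_bards
-- ===== SOURCE B (Python) =====
-- def unheard_songs(villagers, bards, songs, parties):
--     """Songs only bards know: keep each song iff no villager's known-set contains it."""
--     return {song for song in songs
--             if not any(song in known for known in villagers.values())}
-- ===== Notes on version B (the rewrite author's own statement) =====
-- stated objective: simpler
-- what changed: Replaces A's accumulated union of all villagers' song sets followed by a set difference with a single set comprehension that keeps each song key iff no villager's known-set contains it (no union set is ever built).
import Mathlib
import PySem

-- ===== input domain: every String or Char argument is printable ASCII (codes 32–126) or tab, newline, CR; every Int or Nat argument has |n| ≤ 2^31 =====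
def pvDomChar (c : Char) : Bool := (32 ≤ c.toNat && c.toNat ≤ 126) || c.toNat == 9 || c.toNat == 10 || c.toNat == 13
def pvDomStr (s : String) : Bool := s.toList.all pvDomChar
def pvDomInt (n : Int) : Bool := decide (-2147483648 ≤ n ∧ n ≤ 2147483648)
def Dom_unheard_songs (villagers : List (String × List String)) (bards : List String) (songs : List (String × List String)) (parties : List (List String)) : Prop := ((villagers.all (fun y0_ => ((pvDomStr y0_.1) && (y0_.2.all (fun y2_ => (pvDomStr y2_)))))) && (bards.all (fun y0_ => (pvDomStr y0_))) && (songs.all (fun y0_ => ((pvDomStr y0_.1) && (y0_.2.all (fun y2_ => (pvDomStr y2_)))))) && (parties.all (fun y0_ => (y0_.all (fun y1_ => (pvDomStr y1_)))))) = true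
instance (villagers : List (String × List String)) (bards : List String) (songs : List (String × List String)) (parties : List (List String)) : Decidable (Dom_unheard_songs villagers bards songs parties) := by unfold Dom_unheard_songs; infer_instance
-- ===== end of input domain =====

-- B replaces A's union-all-then-set-difference with a per-song scan over villagers (simpler, no union set); bards/parties stay unused as in A.

-- ===== PORT A =====
-- A: union all villagers' known sets, collect song keys into a set, return the difference.
def unheard_songs (villagers : List (String × List String)) (bards : List String) (songs : List (String × List String)) (parties : List (List String)) : List String :=
  let villagers_knows_songs : PySem.Set String :=
    villagers.foldl (fun s p => PySem.Set.union s p.2) PySem.Set.empty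
  let all_songs : PySem.Set String :=
    songs.foldl (fun s p => PySem.Set.add s p.1) PySem.Set.empty
  PySem.Set.diff all_songs villagers_knows_songs

-- ===== PORT B =====
-- B: set comprehension — keep a song key iff no villager's known-set contains it.
def unheard_songs_alt (villagers : List (String × List String)) (bards : List String) (songs : List (String × List String)) (parties : List (List String)) : List String :=
  PySem.Set.ofList ((songs.map (·.1)).filter
    (fun song => !(villagers.map (·.2)).any (fun known => PySem.Set.contains known song)))

-- ===== PRECONDITION & SPEC =====
def Spec_unheard_songs (villagers : List (String × List String)) (bards : List String) (songs : List (String × List String)) (parties : List (List String)) (out : List String) : Prop := out = unheard_songs_alt villagers bards songs parties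
instance (villagers : List (String × List String)) (bards : List String) (songs : List (String × List String)) (parties : List (List String)) (out : List String) : Decidable (Spec_unheard_songs villagers bards songs parties out) := by unfold Spec_unheard_songs; infer_instance

-- ===== CLAIM (what is proved, stated in full; the proofs are below) =====
def Claim_equal_unheard_songs : Prop := ∀ (villagers : List (String × List String)) (bards : List String) (songs : List (String × List String)) (parties : List (List String)), Dom_unheard_songs villagers bards songs parties → Spec_unheard_songs villagers bards songs parties (unheard_songs villagers bards songs parties)

-- ===== LEMMAS AND PROOFS =====

-- membership in the folded union = some listed set contains it
theorem mem_foldl_union {α : Type} [BEq α] [LawfulBEq α]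
    (l : List (List α)) (s : PySem.Set α) (x : α) :
    x ∈ l.foldl PySem.Set.union s ↔ x ∈ s ∨ ∃ ks ∈ l, x ∈ ks := by
  induction l generalizing s with
  | nil => simp
  | cons h t ih =>
    simp [List.foldl_cons, ih, PySem.Set.mem_union]
    tauto

-- set(filter) = filter(set): ofList commutes with filter
theorem ofList_filter {α : Type} [BEq α] [LawfulBEq α] (p : α → Bool) (xs : List α) :
    PySem.Set.ofList (xs.filter p) = (PySem.Set.ofList xs).filter p := by
  induction xs using List.reverseRecOn with
  | nil => rfl
  | append_singleton ys y ih =>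
    rw [List.filter_append, PySem.Set.ofList_append_singleton, PySem.Set.add_eq_ite]
    by_cases hp : p y = true
    · have h1 : List.filter p [y] = [y] := by simp [hp]
      rw [h1, PySem.Set.ofList_append_singleton, PySem.Set.add_eq_ite, ih]
      by_cases hy : y ∈ PySem.Set.ofList ys
      · simp [hy, List.mem_filter, hp]
      · have hy' : y ∉ List.filter p (PySem.Set.ofList ys) := by
          simp [List.mem_filter, hy]
        simp [hy, hy', List.filter_append, hp]
    · have h1 : List.filter p [y] = [] := by simp [hp]
      rw [h1, List.append_nil, ih]
      by_cases hy : y ∈ PySem.Set.ofList ys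
      · simp [hy]
      · simp [hy, List.filter_append, hp]

theorem diff_eq_filter {α : Type} [BEq α] [LawfulBEq α] (s t : PySem.Set α) :
    PySem.Set.diff s t = s.filter (fun x => !PySem.Set.contains t x) := by
  rfl

theorem unheard_songs_spec : Claim_equal_unheard_songs := by
  intro villagers bards songs parties _
  show unheard_songs villagers bards songs parties = unheard_songs_alt villagers bards songs parties
  unfold unheard_songs unheard_songs_alt
  rw [diff_eq_filter]
  have hall : songs.foldl (fun s p => PySem.Set.add s p.1) PySem.Set.empty
      = PySem.Set.ofList (songs.map (·.1)) := by
    rw [PySem.Set.ofList_eq_foldl, List.foldl_map]; rfl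
  have hfold : villagers.foldl (fun s p => PySem.Set.union s p.2) PySem.Set.empty
      = (villagers.map (·.2)).foldl PySem.Set.union PySem.Set.empty := by
    rw [List.foldl_map]
  rw [hall, ← ofList_filter]
  congr 1
  apply List.filter_congr
  intro song _
  have hmem : (song ∈ villagers.foldl (fun s p => PySem.Set.union s p.2) PySem.Set.empty)
      ↔ ∃ ks ∈ villagers.map (·.2), song ∈ ks := by
    rw [hfold, mem_foldl_union]
    simp [PySem.Set.empty]
  apply congrArg
  rw [Bool.eq_iff_iff]
  simp only [PySem.Set.contains_iff, List.any_eq_true, hmem]
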